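-- pv_equiv track=rewrite | github.com/samayunPathan/leetcode-programming-practise | 2500_delete_element.py | max_ele
-- ===== SOURCE A (Python) =====
-- def max_ele(grid):
--     length=len(grid);s=0
--     while True:
--         c_m=[]
--         if len(grid[0])==0:
--             break
--         for i in range(length):
--             c_e=max(grid[i])
--             grid[i].remove(c_e)
--             c_m.append(c_e)
--         s+=max(c_m)
--     return s
-- ===== SOURCE B (Python) =====
-- def max_ele(grid):
--     rows = [sorted(r, reverse=True) for r in grid]
--     return sum(max(col) for col in zip(*rows))
-- ===== Notes on version B (the rewrite author's own statement) =====
-- stated objective: faster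
-- what changed: A repeatedly scans every row for its max and removes it (one round per column, mutating the grid); B sorts each row once in descending order and sums the maxima of the columns of zip(*rows), with no mutation.
-- outside the precondition, e.g. on max_ele([]): A raises IndexError, B returns 0; on max_ele([[1, 2], [3]]): A raises ValueError, B returns 3
import Mathlib
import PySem

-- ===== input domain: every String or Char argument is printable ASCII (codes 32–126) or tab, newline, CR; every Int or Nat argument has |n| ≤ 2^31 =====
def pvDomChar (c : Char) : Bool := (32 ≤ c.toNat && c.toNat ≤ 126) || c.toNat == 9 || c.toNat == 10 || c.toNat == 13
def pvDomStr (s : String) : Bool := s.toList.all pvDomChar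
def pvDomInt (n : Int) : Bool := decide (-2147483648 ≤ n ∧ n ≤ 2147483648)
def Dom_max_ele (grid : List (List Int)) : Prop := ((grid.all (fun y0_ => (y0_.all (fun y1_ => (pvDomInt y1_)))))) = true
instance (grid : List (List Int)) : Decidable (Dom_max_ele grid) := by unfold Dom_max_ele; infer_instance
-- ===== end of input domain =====

-- B replaces A's repeated max-and-remove rounds by sorting each row once and summing per-column
-- maxima; A empties the rows of `grid` in place, B does not mutate its argument — the equivalence
-- proved here is about the RETURN value only.

-- ===== PORT A =====
-- one round of A's inner for-loop: per row, c_e = max(grid[i]); grid[i].remove(c_e); c_m.append(c_e).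
-- none = some row was empty (Python's max([]) raises ValueError there).
def pvRound : List (List Int) → Option (List Int × List (List Int))
  | [] => some ([], [])
  | row :: rest =>
    match PySem.List.max? row (fun x => x) with
    | none => none
    | some m =>
      match PySem.List.remove? row m, pvRound rest with
      | some row', some (cm, g) => some (m :: cm, row' :: g)
      | _, _ => none

-- termination helper for max_ele_loop: a successful round shortens the first row by one
theorem pvRound_head_len (row : List Int) (rest : List (List Int)) (cm : List Int)
    (g : List (List Int)) (h : pvRound (row :: rest) = some (cm, g)) :
    (g.headD []).length + 1 = row.length := by
  unfold pvRound at h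
  split at h
  · exact absurd h (by simp)
  · rename_i m hm
    split at h
    · rename_i row' cm' g' hrow' hrest
      have hmem : m ∈ row := by
        by_contra hc
        rw [(PySem.List.remove?_eq_none_iff row m).mpr hc] at hrow'
        exact absurd hrow' (by simp)
      rw [PySem.List.remove?_eq_some_erase row m hmem] at hrow'
      simp only [Option.some.injEq] at hrow'
      subst hrow'
      simp only [Option.some.injEq, Prod.mk.injEq] at h
      obtain ⟨_, hg⟩ := h
      subst hg
      simp only [List.headD_cons]
      rw [List.length_erase_of_mem hmem]
      have := List.length_pos_of_mem hmem
      omega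
    · exact absurd h (by simp)

-- the while-True loop: state = (grid, s)
def max_ele_loop (grid : List (List Int)) (s : Int) : Int :=
  match grid with
  | [] => s            -- Python: grid[0] raises IndexError here (outside Pre_)
  | r0 :: rest =>
    if r0.length = 0 then s
    else
      match _h : pvRound (r0 :: rest) with
      | none => s      -- Python: max([]) raises ValueError here (outside Pre_)
      | some (cm, grid') =>
        max_ele_loop grid' (s + (PySem.List.max? cm (fun x => x)).getD 0)
termination_by (grid.headD []).length
decreasing_by
  simp only [List.headD_cons]
  have := pvRound_head_len r0 rest cm grid' _h
  omega

def max_ele (grid : List (List Int)) : Int := max_ele_loop grid 0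

-- ===== PORT B =====
-- zip(*rows): columns until the shortest row is exhausted (structural on the first row;
-- the other rows are tested for exhaustion by `[] ∈ rest`)
def pyZipGo : List Int → List (List Int) → List (List Int)
  | [], _ => []
  | a :: t, rest =>
    if [] ∈ rest then []
    else (a :: rest.map (fun r => r.headD 0)) :: pyZipGo t (rest.map List.tail)

def pyZip (rows : List (List Int)) : List (List Int) :=
  match rows with
  | [] => []
  | r0 :: rest => pyZipGo r0 rest

def max_ele_alt (grid : List (List Int)) : Int :=
  let rows := grid.map (fun r => PySem.List.sorted r (fun x => x) true)
  ((pyZip rows).map (fun col => (PySem.List.max? col (fun x => x)).getD 0)).sum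

-- ===== PRECONDITION & SPEC =====
-- Pre_ excludes exactly the inputs on which A raises: the empty grid (IndexError on grid[0]) and
-- grids where some row is shorter than the first row (max([]) raises once that row is exhausted).
def Pre_max_ele (grid : List (List Int)) : Prop :=
  grid ≠ [] ∧ ∀ row ∈ grid, (grid.headD []).length ≤ row.length
instance (grid : List (List Int)) : Decidable (Pre_max_ele grid) := by unfold Pre_max_ele; infer_instance

def pvWitness_max_ele : List (List Int) := [[1, 2], [3, 4]]

def Spec_max_ele (grid : List (List Int)) (out : Int) : Prop := out = max_ele_alt grid
instance (grid : List (List Int)) (out : Int) : Decidable (Spec_max_ele grid out) := by unfold Spec_max_ele; infer_instance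

-- ===== CLAIM (what is proved, stated in full; the proofs are below) =====
def Claim_equal_max_ele : Prop := ∀ (grid : List (List Int)), Dom_max_ele grid → Pre_max_ele grid → Spec_max_ele grid (max_ele grid)

-- ===== LEMMAS AND PROOFS =====

-- abbreviations for the proofs (not used by the ports)
def sortedDesc (r : List Int) : List Int := PySem.List.sorted r (fun x => x) true
def pvMax (r : List Int) : Int := (PySem.List.max? r (fun x => x)).getD 0
def colSum (g : List (List Int)) : Int :=
  ((pyZip (g.map sortedDesc)).map pvMax).sum

theorem alt_eq_colSum (g : List (List Int)) : max_ele_alt g = colSum g := rfl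

theorem max?_of_ne_nil (r : List Int) (h : r ≠ []) :
    PySem.List.max? r (fun x => x) = some (pvMax r) := by
  cases hm : PySem.List.max? r (fun x => x) with
  | none => exact absurd ((PySem.List.max?_eq_none_iff r (fun x => x)).mp hm) h
  | some m => simp [pvMax, hm]

-- the head of the descending sort is the max, its tail the descending sort of the rest
theorem sortedDesc_cons (r : List Int) (h : r ≠ []) :
    sortedDesc r = pvMax r :: sortedDesc (r.erase (pvMax r)) := by
  have hm := max?_of_ne_nil r h
  have hmem : pvMax r ∈ r := PySem.List.max?_mem hm
  have hperm : (pvMax r :: sortedDesc (r.erase (pvMax r))).Perm r :=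
    (List.Perm.cons (pvMax r) (PySem.List.sorted_perm _ _ _)).trans
      (List.perm_cons_erase hmem).symm
  refine List.Perm.eq_of_pairwise
    (fun _ _ _ _ hab hba => le_antisymm hba hab) ?_ ?_
    ((PySem.List.sorted_perm _ _ _).trans hperm.symm)
  · exact PySem.List.sorted_pairwise_rev r (fun x => x)
  · refine List.Pairwise.cons ?_ (PySem.List.sorted_pairwise_rev _ (fun x => x))
    intro y hy
    have : y ∈ r := (List.erase_subset) ((PySem.List.mem_sorted _ _ _ _).mp hy)
    exact PySem.List.max?_isMax hm y this

-- a round on all-nonempty rows: per-row maxima and the rows with their max removed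
theorem pvRound_some (g : List (List Int)) (h : ∀ row ∈ g, row ≠ []) :
    pvRound g = some (g.map pvMax, g.map (fun r => r.erase (pvMax r))) := by
  induction g with
  | nil => rfl
  | cons row rest ih =>
    have hrow : row ≠ [] := h row List.mem_cons_self
    have hm := max?_of_ne_nil row hrow
    have hmem : pvMax row ∈ row := PySem.List.max?_mem hm
    have hrem := PySem.List.remove?_eq_some_erase row (pvMax row) hmem
    have hrest := ih (fun r hr => h r (List.mem_cons_of_mem _ hr))
    unfold pvRound
    rw [hm]
    simp only [hrem, hrest, List.map_cons]

-- peeling one column off B's sum, for a grid of nonempty rows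
theorem colSum_step (r0 : List Int) (rest : List (List Int))
    (h : ∀ row ∈ r0 :: rest, row ≠ []) :
    colSum (r0 :: rest)
      = pvMax ((r0 :: rest).map pvMax)
        + colSum ((r0 :: rest).map (fun r => r.erase (pvMax r))) := by
  have hr0 : r0 ≠ [] := h r0 List.mem_cons_self
  have hrest : ∀ row ∈ rest, row ≠ [] := fun r hr => h r (List.mem_cons_of_mem _ hr)
  have hnil : [] ∉ rest.map sortedDesc := by
    intro hc
    obtain ⟨r, hr, hre⟩ := List.mem_map.mp hc
    exact hrest r hr ((PySem.List.sorted_eq_nil_iff r (fun x => x) true).mp hre)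
  have hheads : (rest.map sortedDesc).map (fun r => r.headD 0) = rest.map pvMax := by
    rw [List.map_map]
    refine List.map_congr_left ?_
    intro r hr
    simp [Function.comp, sortedDesc_cons r (hrest r hr)]
  have htails : (rest.map sortedDesc).map List.tail
      = (rest.map (fun r => r.erase (pvMax r))).map sortedDesc := by
    rw [List.map_map, List.map_map]
    refine List.map_congr_left ?_
    intro r hr
    simp [Function.comp, sortedDesc_cons r (hrest r hr)]
  unfold colSum
  simp only [List.map_cons]
  rw [sortedDesc_cons r0 hr0]
  show ((pyZipGo (pvMax r0 :: sortedDesc (r0.erase (pvMax r0))) (rest.map sortedDesc)).map pvMax).sum = _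
  rw [pyZipGo, if_neg hnil, hheads, htails]
  simp only [List.map_cons, List.sum_cons]
  rfl

-- the main loop invariant: on a grid whose rows all have length ≥ the first row's,
-- the loop adds exactly B's column sum
theorem loop_eq (n : Nat) : ∀ (g : List (List Int)) (s : Int),
    (g.headD []).length = n → g ≠ [] → (∀ row ∈ g, n ≤ row.length) →
    max_ele_loop g s = s + colSum g := by
  induction n with
  | zero =>
    intro g s hlen hne _
    obtain ⟨r0, rest, rfl⟩ := List.exists_cons_of_ne_nil hne
    simp only [List.headD_cons] at hlen
    have hr0 : r0 = [] := List.eq_nil_of_length_eq_zero hlen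
    subst hr0
    rw [max_ele_loop]
    simp [colSum, sortedDesc, pyZip, pyZipGo, PySem.List.sorted]
  | succ n ih =>
    intro g s hlen hne hrows
    obtain ⟨r0, rest, rfl⟩ := List.exists_cons_of_ne_nil hne
    simp only [List.headD_cons] at hlen
    have hnn : ∀ row ∈ r0 :: rest, row ≠ [] := by
      intro row hr hcontra
      have := hrows row hr
      rw [hcontra] at this
      simp at this
    have hround := pvRound_some (r0 :: rest) hnn
    rw [max_ele_loop]
    rw [if_neg (by omega)]
    split
    · rename_i heq; rw [hround] at heq; exact absurd heq (by simp)
    · rename_i cm g' heq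
      rw [hround] at heq
      simp only [Option.some.injEq, Prod.mk.injEq] at heq
      obtain ⟨hcm, hg'⟩ := heq
      subst hcm; subst hg'
      have hg'ne : (r0 :: rest).map (fun r => r.erase (pvMax r)) ≠ [] := by simp
      have hg'head : (((r0 :: rest).map (fun r => r.erase (pvMax r))).headD []).length = n := by
        simp only [List.map_cons, List.headD_cons]
        have : pvMax r0 ∈ r0 := PySem.List.max?_mem (max?_of_ne_nil r0 (hnn r0 List.mem_cons_self))
        rw [List.length_erase_of_mem this, hlen]
        omega
      have hg'rows : ∀ row ∈ (r0 :: rest).map (fun r => r.erase (pvMax r)), n ≤ row.length := by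
        intro row hr
        obtain ⟨r, hrm, rfl⟩ := List.mem_map.mp hr
        have h1 := hrows r hrm
        have : pvMax r ∈ r := PySem.List.max?_mem (max?_of_ne_nil r (hnn r hrm))
        rw [List.length_erase_of_mem this]
        omega
      rw [ih _ _ hg'head hg'ne hg'rows]
      rw [colSum_step r0 rest hnn]
      have : (PySem.List.max? ((r0 :: rest).map pvMax) (fun x => x)).getD 0
          = pvMax ((r0 :: rest).map pvMax) := rfl
      rw [this]
      ring

-- ===== VERDICT (by name: the statement is the Claim_ definition above) =====
theorem max_ele_spec : Claim_equal_max_ele := by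
  intro grid _ hpre
  obtain ⟨hne, hrows⟩ := hpre
  show max_ele grid = max_ele_alt grid
  rw [alt_eq_colSum, max_ele,
    loop_eq ((grid.headD []).length) grid 0 rfl hne hrows]
  ring
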